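-- pv_equiv track=rewrite | github.com/AbdulHakeemPH40/cortex | src/agent/src/tools/BashTool/pathValidation.py | filter_out_flags
-- ===== SOURCE A (Python) =====
-- from typing import Any, Dict, List, Literal, Optional, Set, Tuple, Union
--
-- def filter_out_flags(args: List[str]) -> List[str]:
--     """
--     SECURITY: Extract positional (non-flag) arguments, correctly handling the
--     POSIX `--` end-of-options delimiter.
--
--     Most commands (rm, cat, touch, etc.) stop parsing options at `--` and treat
--     ALL subsequent arguments as positional, even if they start with `-`. Naive
--     `!arg.startswith('-')` filtering drops these, causing path validation to be
--     silently skipped for attack payloads like: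
--
--       rm -- -/../.claude/settings.local.json
--
--     Here `-/../.claude/settings.local.json` starts with `-` so the naive filter
--     drops it, validation sees zero paths, returns passthrough, and the file is
--     deleted without a prompt. With `--` handling, the path IS extracted and
--     validated (blocked by is_claude_config_file_path / path_in_allowed_working_path).
--     """
--     result = []
--     after_double_dash = False
--
--     for arg in args:
--         if after_double_dash:
--             result.append(arg)
--         elif arg == '--':
--             after_double_dash = True
--         elif not arg.startswith('-'):
--             result.append(arg)
--
--     return result
-- ===== SOURCE B (Python) =====
-- def filter_out_flags(args):
--     """Locate the first '--' (if any), filter flags only before it, keep the tail wholesale."""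
--     if '--' in args:
--         i = args.index('--')
--         return [a for a in args[:i] if not a.startswith('-')] + args[i+1:]
--     return [a for a in args if not a.startswith('-')]
-- ===== Notes on version B (the rewrite author's own statement) =====
-- stated objective: simpler
-- what changed: B locates the first '--' with index() and splits the list there (filter the head, keep the tail wholesale) instead of threading an after_double_dash boolean through a single stateful loop.
import Mathlib
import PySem

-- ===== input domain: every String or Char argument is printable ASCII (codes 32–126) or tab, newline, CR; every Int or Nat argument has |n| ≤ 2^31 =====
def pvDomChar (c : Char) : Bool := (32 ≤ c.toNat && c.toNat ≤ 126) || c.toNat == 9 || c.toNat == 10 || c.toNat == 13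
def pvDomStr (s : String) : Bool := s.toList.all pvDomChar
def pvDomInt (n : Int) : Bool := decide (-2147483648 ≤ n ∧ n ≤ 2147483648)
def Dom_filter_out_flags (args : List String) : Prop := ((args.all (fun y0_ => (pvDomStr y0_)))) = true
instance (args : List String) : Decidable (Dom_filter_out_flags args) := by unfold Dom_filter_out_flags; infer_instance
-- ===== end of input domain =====

-- B replaces A's stateful boolean loop by a locate-the-first-'--'-then-split decomposition (objective: simpler).

-- ===== PORT A =====
-- loop of A: state = (result accumulator, after_double_dash flag)
def filterOutFlagsGoA : List String → Bool → List String → List String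
  | [], _, res => res
  | a :: rest, after, res =>
    if after then filterOutFlagsGoA rest after (res ++ [a])
    else if a = "--" then filterOutFlagsGoA rest true res
    else if PySem.Str.startswith a "-" = false then filterOutFlagsGoA rest after (res ++ [a])
    else filterOutFlagsGoA rest after res

def filter_out_flags (args : List String) : List String :=
  filterOutFlagsGoA args false []

-- ===== PORT B =====
def filter_out_flags_alt (args : List String) : List String :=
  match PySem.List.index? args "--" with
  | some i =>
      (PySem.List.slice args none (some (i : Int))).filter
        (fun a => !(PySem.Str.startswith a "-"))
        ++ PySem.List.slice args (some ((i : Int) + 1)) none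
  | none => args.filter (fun a => !(PySem.Str.startswith a "-"))

-- ===== PRECONDITION & SPEC =====
def Spec_filter_out_flags (args : List String) (out : List String) : Prop := out = filter_out_flags_alt args
instance (args : List String) (out : List String) : Decidable (Spec_filter_out_flags args out) := by unfold Spec_filter_out_flags; infer_instance

-- ===== CLAIM (what is proved, stated in full; the proofs are below) =====
def Claim_equal_filter_out_flags : Prop := ∀ (args : List String), Dom_filter_out_flags args → Spec_filter_out_flags args (filter_out_flags args)

-- ===== LEMMAS AND PROOFS =====

theorem goA_true (args res : List String) :
    filterOutFlagsGoA args true res = res ++ args := by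
  induction args generalizing res with
  | nil => simp [filterOutFlagsGoA]
  | cons a rest ih => simp [filterOutFlagsGoA, ih]

theorem goA_false_no_dd (args res : List String) (h : "--" ∉ args) :
    filterOutFlagsGoA args false res
      = res ++ args.filter (fun a => !(PySem.Str.startswith a "-")) := by
  induction args generalizing res with
  | nil => simp [filterOutFlagsGoA]
  | cons a rest ih =>
    simp only [List.mem_cons, not_or] at h
    have hne : ¬ a = "--" := fun hc => h.1 hc.symm
    by_cases hs : PySem.Str.startswith a "-" = false
    all_goals
      simp only [Bool.not_eq_false] at hs
      simp [filterOutFlagsGoA, hne, hs, ih _ h.2, List.filter_cons,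
        PySem.Str.startswith] at hs ⊢ <;>
      simp [hs]

theorem goA_split (pre suf res : List String) (h : "--" ∉ pre) :
    filterOutFlagsGoA (pre ++ "--" :: suf) false res
      = res ++ pre.filter (fun a => !(PySem.Str.startswith a "-")) ++ suf := by
  induction pre generalizing res with
  | nil => simp [filterOutFlagsGoA, goA_true]
  | cons a rest ih =>
    simp only [List.mem_cons, not_or] at h
    have hne : ¬ a = "--" := fun hc => h.1 hc.symm
    by_cases hs : PySem.Str.startswith a "-" = false
    all_goals
      simp only [Bool.not_eq_false] at hs
      simp [filterOutFlagsGoA, hne, hs, ih _ h.2, List.filter_cons,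
        PySem.Str.startswith] at hs ⊢ <;>
      simp [hs]

-- ===== VERDICT (by name: the statement is the Claim_ definition above) =====
theorem filter_out_flags_spec : Claim_equal_filter_out_flags := by
  intro args _
  unfold Spec_filter_out_flags filter_out_flags filter_out_flags_alt
  rcases hidx : PySem.List.index? args "--" with _ | i
  · have hmem : "--" ∉ args := (PySem.List.index?_eq_none_iff _ _).mp hidx
    simp [goA_false_no_dd args [] hmem]
  · obtain ⟨pre, suf, hargs, hlen, hpre⟩ := (PySem.List.index?_eq_some_iff _ _ _).mp hidx
    subst hargs
    rw [goA_split pre suf [] hpre]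
    have h1 : PySem.List.slice (pre ++ "--" :: suf) none (some (i : Int))
        = pre := by
      rw [PySem.List.slice_to_natCast]
      simp [← hlen]
    have h2 : PySem.List.slice (pre ++ "--" :: suf) (some ((i : Int) + 1)) none
        = suf := by
      have : ((i : Int) + 1) = ((i + 1 : Nat) : Int) := by push_cast; ring
      rw [this, PySem.List.slice_from_natCast]
      simp [← hlen, List.drop_append]
    simp [h1, h2]
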